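-- pv_equiv track=rewrite | github.com/ncmadhu/coding-problems-2025 | prefix_sums/num_ways_to_split_array.py | alternate_way
-- ===== SOURCE A (Python) =====
-- def alternate_way(nums):
--     # we do not need the prefix array at all
--     # we can calculate the left sum on the fly by adding the current element to sum so far
--     # for right section we can subtract the current left sum - total sum of the array
--     total_sum = sum(nums)
--     left = split_count = 0
--     for i in range(len(nums) - 1):
--         left += nums[i]
--         if left >= total_sum - left:
--             split_count += 1
--     return split_count
-- ===== SOURCE B (Python) =====
-- def alternate_way(nums):
--     # Different algorithm: sort the prefix sums (all but the last) and binary-search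
--     # the threshold ceil(total/2); every sorted prefix at or after that point is a
--     # valid split, so the answer is len(prefix) - insertion_point.
--     total = sum(nums)
--     threshold = -(-total // 2)  # 2*p >= total  iff  p >= ceil(total/2)
--     prefix = []
--     s = 0
--     for x in nums[:-1]:
--         s += x
--         prefix.append(s)
--     prefix.sort()
--     lo, hi = 0, len(prefix)
--     while lo < hi:
--         mid = (lo + hi) // 2
--         if prefix[mid] < threshold:
--             lo = mid + 1
--         else:
--             hi = mid
--     return len(prefix) - lo
-- ===== Notes on version B (the rewrite author's own statement) =====
-- stated objective: alternative
-- what changed: A fuses prefix accumulation and threshold checking into one linear scan; B sorts the prefix sums and binary-searches the threshold ceil(total/2), returning len(prefix) minus the insertion point.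
import Mathlib
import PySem

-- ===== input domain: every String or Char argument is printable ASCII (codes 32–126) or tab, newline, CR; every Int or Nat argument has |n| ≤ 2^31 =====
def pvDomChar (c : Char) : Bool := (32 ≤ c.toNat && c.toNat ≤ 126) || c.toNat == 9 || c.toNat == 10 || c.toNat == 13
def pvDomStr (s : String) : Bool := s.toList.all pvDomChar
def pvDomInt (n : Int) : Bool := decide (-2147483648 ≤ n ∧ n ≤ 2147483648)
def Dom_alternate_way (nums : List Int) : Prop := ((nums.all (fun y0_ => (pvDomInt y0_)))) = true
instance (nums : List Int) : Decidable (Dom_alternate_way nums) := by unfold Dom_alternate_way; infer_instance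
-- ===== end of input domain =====

-- B sorts the prefix sums and binary-searches the threshold ceil(total/2) instead of A's fused linear scan; alternative algorithm, same result.

-- ===== PORT A =====
def alternate_way (nums : List Int) : Int :=
  let total_sum := nums.sum
  ((PySem.List.pyRange 0 ((nums.length : Int) - 1) 1).foldl
    (fun (st : Int × Int) i =>
      let left := st.1 + PySem.List.pyGetD nums i 0
      (left, if left ≥ total_sum - left then st.2 + 1 else st.2))
    (0, 0)).2

-- ===== PORT B =====
-- the hand-written binary-search while loop of Source B (lo, hi stay ≥ 0, so Nat; '//2' of
-- nonnegative ints agrees with Nat division; prefix[mid] always has 0 ≤ mid < len, where pyGetD is exact)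
def pyBisect (pre : List Int) (threshold : Int) (lo hi : Nat) : Nat :=
  if lo < hi then
    let mid := (lo + hi) / 2
    if PySem.List.pyGetD pre (mid : Int) 0 < threshold then pyBisect pre threshold (mid + 1) hi
    else pyBisect pre threshold lo mid
  else lo
termination_by hi - lo
decreasing_by all_goals omega

def alternate_way_alt (nums : List Int) : Int :=
  let total := nums.sum
  let threshold := -(PySem.Int.floordiv (-total) 2)
  let st := (PySem.List.slice nums none (some (-1))).foldl
      (fun (q : List Int × Int) x => (q.1 ++ [q.2 + x], q.2 + x)) ([], 0)
  let pre := PySem.List.sorted st.1 (fun x => x) false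
  let lo := pyBisect pre threshold 0 pre.length
  (pre.length : Int) - (lo : Int)

-- ===== PRECONDITION & SPEC =====
def Spec_alternate_way (nums : List Int) (out : Int) : Prop := out = alternate_way_alt nums
instance (nums : List Int) (out : Int) : Decidable (Spec_alternate_way nums out) := by unfold Spec_alternate_way; infer_instance

-- ===== CLAIM (what is proved, stated in full; the proofs are below) =====
def Claim_equal_alternate_way : Prop := ∀ (nums : List Int), Dom_alternate_way nums → Spec_alternate_way nums (alternate_way nums)

-- ===== LEMMAS AND PROOFS =====

/-- prefix sums starting from accumulator `s` (proof-only helper) -/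
def accP (s : Int) : List Int → List Int
  | [] => []
  | x :: xs => (s + x) :: accP (s + x) xs

theorem build_eq (l : List Int) : ∀ (pr : List Int) (s : Int),
    l.foldl (fun (q : List Int × Int) x => (q.1 ++ [q.2 + x], q.2 + x)) (pr, s)
      = (pr ++ accP s l, s + l.sum) := by
  induction l with
  | nil => intro pr s; simp [accP]
  | cons x xs ih => intro pr s; simp [accP, ih, add_assoc]

theorem fused_eq (total : Int) (l : List Int) : ∀ (s c : Int),
    l.foldl (fun (st : Int × Int) x =>
        let left := st.1 + x
        (left, if left ≥ total - left then st.2 + 1 else st.2)) (s, c)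
      = (s + l.sum, c + ((accP s l).countP (fun p => decide (total - p ≤ p)) : Int)) := by
  induction l with
  | nil => intro s c; simp [accP]
  | cons x xs ih =>
    intro s c
    simp only [List.foldl_cons, accP, List.countP_cons]
    rw [ih, Prod.ext_iff]
    refine ⟨by simp [List.sum_cons]; ring, ?_⟩
    by_cases h : total - (s + x) ≤ s + x <;>
      simp only [h, decide_true, decide_false, if_true, if_false] <;>
      push_cast <;> omega

theorem pyGetD_take (l : List Int) (k : Nat) (hk : k ≤ l.length) (i : Int)
    (h0 : 0 ≤ i) (hi : i < (k : Int)) (d : Int) :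
    PySem.List.pyGetD (l.take k) i d = PySem.List.pyGetD l i d := by
  have h1 : i < ((l.take k).length : Int) := by simp; omega
  have h2 : i < (l.length : Int) := by omega
  rw [PySem.List.pyGetD_eq_getElem _ _ h0 h1, PySem.List.pyGetD_eq_getElem _ _ h0 h2]
  simp [List.getElem_take]

/-- invariant of the hand-written binary search on a sorted list -/
theorem pyBisect_inv (l : List Int) (t : Int) (hs : l.Pairwise (· ≤ ·)) :
    ∀ (n lo hi : Nat), hi - lo = n → lo ≤ hi → hi ≤ l.length →
    (∀ j (_ : j < l.length), j < lo → l[j] < t) →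
    (∀ j (_ : j < l.length), hi ≤ j → t ≤ l[j]) →
    pyBisect l t lo hi ≤ l.length ∧
    (∀ j (_ : j < l.length), j < pyBisect l t lo hi → l[j] < t) ∧
    (∀ j (_ : j < l.length), pyBisect l t lo hi ≤ j → t ≤ l[j]) := by
  intro n
  induction n using Nat.strong_induction_on with
  | _ n ih =>
    intro lo hi hn hlh hhl hlow hhigh
    rw [pyBisect]
    by_cases h : lo < hi
    · simp only [h, if_true]
      have hmidlt : (lo + hi) / 2 < l.length := by omega
      have hget : PySem.List.pyGetD l (((lo + hi) / 2 : Nat) : Int) 0 = l[(lo + hi) / 2] := by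
        rw [PySem.List.pyGetD_eq_getElem _ _ (by omega) (by exact_mod_cast hmidlt)]
        simp only [Int.toNat_natCast]
      have hmono := List.pairwise_iff_getElem.mp hs
      by_cases hc : PySem.List.pyGetD l (((lo + hi) / 2 : Nat) : Int) 0 < t
      · simp only [hc, if_true]
        refine ih (hi - ((lo + hi) / 2 + 1)) (by omega) _ _ rfl (by omega) hhl ?_ hhigh
        intro j hj hjlt
        rw [hget] at hc
        rcases Nat.lt_or_ge j ((lo + hi) / 2) with h' | h'
        · have := hmono j ((lo + hi) / 2) hj hmidlt h'; omega
        · have : j = (lo + hi) / 2 := by omega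
          subst this; omega
      · simp only [hc, if_false]
        refine ih ((lo + hi) / 2 - lo) (by omega) _ _ rfl (by omega) (by omega) hlow ?_
        intro j hj hjge
        rw [hget] at hc
        rcases Nat.lt_or_ge ((lo + hi) / 2) j with h' | h'
        · have := hmono _ _ hmidlt hj h'; omega
        · have : j = (lo + hi) / 2 := by omega
          subst this; omega
    · simp only [h, if_false]
      exact ⟨by omega, fun j hj hjlt => hlow j hj hjlt, fun j hj hjge => hhigh j hj (by omega)⟩

/-- on a sorted list the binary search over the whole range counts the elements `< t` -/
theorem pyBisect_countP (l : List Int) (t : Int) (hs : l.Pairwise (· ≤ ·)) :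
    pyBisect l t 0 l.length = l.countP (fun p => decide (p < t)) := by
  obtain ⟨hle, hlt, hge⟩ := pyBisect_inv l t hs (l.length - 0) 0 l.length rfl
    (by omega) (le_refl _) (by omega) (by omega)
  set r := pyBisect l t 0 l.length with hr
  have h1 : (l.take r).countP (fun p => decide (p < t)) = (l.take r).length := by
    rw [List.countP_eq_length]
    intro a ha
    obtain ⟨j, hj, hji⟩ := List.mem_iff_getElem.mp ha
    rw [List.length_take] at hj
    have hjl : j < l.length := by omega
    have hjr : j < r := by omega
    have : a = l[j] := by rw [← hji]; simp [List.getElem_take]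
    subst this; simpa using hlt j hjl hjr
  have h2 : (l.drop r).countP (fun p => decide (p < t)) = 0 := by
    rw [List.countP_eq_zero]
    intro a ha
    obtain ⟨j, hj, hji⟩ := List.mem_iff_getElem.mp ha
    rw [List.length_drop] at hj
    have hjl : r + j < l.length := by omega
    have : a = l[r + j] := by rw [← hji]; simp
    subst this
    have := hge (r + j) hjl (by omega)
    simp; omega
  have hsplit := List.countP_append (l₁ := l.take r) (l₂ := l.drop r) (p := fun p => decide (p < t))
  rw [List.take_append_drop] at hsplit
  have hlenr : (l.take r).length = r := by simp [List.length_take]; omega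
  omega

/-- the count of valid splits equals length-minus-bisect on the sorted prefix list -/
theorem count_eq_len_sub_bisect (P : List Int) (total : Int) :
    ((P.countP (fun p => decide (total - p ≤ p)) : Int))
      = (((PySem.List.sorted P (fun x => x) false).length : Int))
        - ((pyBisect (PySem.List.sorted P (fun x => x) false)
              (-(PySem.Int.floordiv (-total) 2)) 0
              (PySem.List.sorted P (fun x => x) false).length : Nat) : Int) := by
  set t : Int := -(PySem.Int.floordiv (-total) 2) with ht
  set S := PySem.List.sorted P (fun x => x) false with hS
  have hperm : S.Perm P := PySem.List.sorted_perm P _ false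
  have hpw : S.Pairwise (· ≤ ·) := by
    have := PySem.List.sorted_pairwise P (fun x => x)
    simpa [hS] using this
  have hiff : ∀ x : Int, (total - x ≤ x) ↔ ¬ (x < t) := by
    intro x
    have h2 := PySem.Int.le_floordiv_iff_mul_le (a := -total) (b := 2) (q := -x) (by norm_num)
    rw [ht]; omega
  rw [pyBisect_countP S t hpw]
  have e1 : P.countP (fun p => decide (total - p ≤ p))
      = S.countP (fun p => decide (¬ p < t)) := by
    rw [List.Perm.countP_eq _ hperm]
    apply List.countP_congr
    intro x _
    simp only [decide_eq_true_eq]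
    exact hiff x
  have e2 := List.length_eq_countP_add_countP (fun p : Int => decide (p < t)) (l := S)
  have e3 : S.countP (fun a => decide ¬ decide (a < t) = true)
      = S.countP (fun p => decide (¬ p < t)) := by
    apply List.countP_congr; intro x _; simp
  rw [e1]
  omega

-- ===== VERDICT (by name: the statement is the Claim_ definition above) =====
theorem alternate_way_spec : Claim_equal_alternate_way := by
  intro nums _
  unfold Spec_alternate_way alternate_way alternate_way_alt
  simp only [PySem.List.slice_to_neg_one, build_eq, List.nil_append, zero_add]
  rw [← count_eq_len_sub_bisect (accP 0 nums.dropLast) nums.sum]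
  cases nums with
  | nil => simp [PySem.List.pyRange_one_eq_nil, accP]
  | cons h0 t0 =>
    set nums := h0 :: t0 with hn
    have hlen : 1 ≤ nums.length := by simp [hn]
    set m : Nat := nums.length - 1 with hm
    have hmi : ((nums.length : Int) - 1) = (m : Int) := by omega
    have hml : m ≤ nums.length := by omega
    rw [hmi]
    have hcongr : (PySem.List.pyRange 0 (m : Int) 1).foldl
        (fun (st : Int × Int) i =>
          let left := st.1 + PySem.List.pyGetD nums i 0
          (left, if left ≥ nums.sum - left then st.2 + 1 else st.2)) (0, 0)
        = (PySem.List.pyRange 0 (m : Int) 1).foldl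
        (fun (st : Int × Int) i =>
          let left := st.1 + PySem.List.pyGetD (nums.take m) i 0
          (left, if left ≥ nums.sum - left then st.2 + 1 else st.2)) (0, 0) := by
      refine PySem.List.foldl_congr_mem _ _ _ _ (fun acc x hx => ?_)
      have hx' := (PySem.List.mem_pyRange_one).mp hx
      rw [pyGetD_take nums m hml x hx'.1 hx'.2]
    rw [hcongr]
    have hlen2 : ((nums.take m).length : Int) = (m : Int) := by
      simp [List.length_take, hml]
    rw [show (m : Int) = ((nums.take m).length : Int) from hlen2.symm]
    rw [PySem.List.foldl_pyRange_zero_pyGetD' (nums.take m) 0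
      (fun (st : Int × Int) x =>
        let left := st.1 + x
        (left, if left ≥ nums.sum - left then st.2 + 1 else st.2)) (0, 0)]
    rw [fused_eq]
    have hdl : accP 0 nums.dropLast = accP 0 (nums.take m) := by
      rw [List.dropLast_eq_take, ← hm]
    rw [hdl]
    simp
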